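-- pv_equiv track=rewrite | github.com/blendnet-ai/skylearn-django-lms | practice/providers/providers.py | generate_grammar_summary
-- ===== SOURCE A (Python) =====
-- def generate_grammar_summary(grammar_score):
--     score_details = {
--         "segments": [
--         {
--             "description": "Novice",
--             "grammar_score_range": [0, 4],
--             "details": "You're making a good effort, but there are many mistakes in your sentences. Keep practicing and try to focus on basic sentence structures."
--         },
--         {
--             "description": "Beginner",
--             "grammar_score_range": [4, 6],
--             "details": "Your sentence formations are getting better, but they can be hard to understand due to frequent grammar errors. Keep practicing and aim for more accuracy in your speech."
--         },
--         {
--             "description": "Intermediate",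
--             "grammar_score_range": [6, 8],
--             "details": "Your speech is comprehensible, but you tend to make grammatical mistakes in certain parts of speech. Keep practicing to further improve your accuracy."
--         },
--         {
--             "description": "Expert",
--             "grammar_score_range": [8, 10],
--             "details": "Top-notch grammar skills! You communicate with great clarity and minimal errors. Keep up the excellent work."
--         }
--     ]
--     }
--
--     segments = score_details["segments"]
--
--     for segment in segments:
--         score_range = segment["grammar_score_range"]
--         if score_range[0] <= grammar_score < score_range[1]:
--             return segment["description"], segment["details"]
--
--     return "Unknown", "Grammar score outside the specified range."
-- ===== SOURCE B (Python) =====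
-- import bisect
--
-- _BOUNDS = [0, 4, 6, 8, 10]
--
-- _PAIRS = [
--     ("Novice", "You're making a good effort, but there are many mistakes in your sentences. Keep practicing and try to focus on basic sentence structures."),
--     ("Beginner", "Your sentence formations are getting better, but they can be hard to understand due to frequent grammar errors. Keep practicing and aim for more accuracy in your speech."),
--     ("Intermediate", "Your speech is comprehensible, but you tend to make grammatical mistakes in certain parts of speech. Keep practicing to further improve your accuracy."),
--     ("Expert", "Top-notch grammar skills! You communicate with great clarity and minimal errors. Keep up the excellent work."),
-- ]
--
--
-- def generate_grammar_summary(grammar_score):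
--     if not (0 <= grammar_score < 10):
--         return "Unknown", "Grammar score outside the specified range."
--     return _PAIRS[bisect.bisect_right(_BOUNDS, grammar_score) - 1]
-- ===== Notes on version B (the rewrite author's own statement) =====
-- stated objective: idiomatic
-- what changed: Replaced the linear scan over segment dicts with one out-of-range guard plus a bisect_right lookup into a sorted boundary table paired with a tuple list.
import Mathlib
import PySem

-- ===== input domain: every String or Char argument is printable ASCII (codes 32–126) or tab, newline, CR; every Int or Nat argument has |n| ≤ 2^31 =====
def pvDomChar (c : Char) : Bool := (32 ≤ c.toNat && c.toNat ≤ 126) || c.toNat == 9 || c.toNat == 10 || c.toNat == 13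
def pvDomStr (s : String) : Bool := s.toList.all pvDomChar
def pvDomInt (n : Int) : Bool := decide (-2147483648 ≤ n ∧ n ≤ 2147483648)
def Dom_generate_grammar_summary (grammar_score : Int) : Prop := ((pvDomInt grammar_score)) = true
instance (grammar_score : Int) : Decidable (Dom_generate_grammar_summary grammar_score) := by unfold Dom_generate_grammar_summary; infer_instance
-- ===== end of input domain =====

-- B replaces A's linear scan over segment records by a range guard plus a bisect_right
-- lookup into a boundary table (more idiomatic); return values are identical.

-- ===== PORT A =====
-- A's segments: (description, (range_lo, range_hi), details), in source order.
def pvSegments_A : List (String × (Int × Int) × String) :=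
  [ ("Novice", (0, 4), "You're making a good effort, but there are many mistakes in your sentences. Keep practicing and try to focus on basic sentence structures."),
    ("Beginner", (4, 6), "Your sentence formations are getting better, but they can be hard to understand due to frequent grammar errors. Keep practicing and aim for more accuracy in your speech."),
    ("Intermediate", (6, 8), "Your speech is comprehensible, but you tend to make grammatical mistakes in certain parts of speech. Keep practicing to further improve your accuracy."),
    ("Expert", (8, 10), "Top-notch grammar skills! You communicate with great clarity and minimal errors. Keep up the excellent work.") ]

-- the 'for segment in segments' loop with its early return
def pvScanSegments (segs : List (String × (Int × Int) × String)) (grammar_score : Int) : String × String :=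
  match segs with
  | [] => ("Unknown", "Grammar score outside the specified range.")
  | (desc, (lo, hi), details) :: rest =>
      if lo ≤ grammar_score ∧ grammar_score < hi then (desc, details)
      else pvScanSegments rest grammar_score

def generate_grammar_summary (grammar_score : Int) : String × String :=
  pvScanSegments pvSegments_A grammar_score

-- ===== PORT B =====
def pvBounds_B : List Int := [0, 4, 6, 8, 10]

def pvPairs_B : List (String × String) :=
  [ ("Novice", "You're making a good effort, but there are many mistakes in your sentences. Keep practicing and try to focus on basic sentence structures."),
    ("Beginner", "Your sentence formations are getting better, but they can be hard to understand due to frequent grammar errors. Keep practicing and aim for more accuracy in your speech."),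
    ("Intermediate", "Your speech is comprehensible, but you tend to make grammatical mistakes in certain parts of speech. Keep practicing to further improve your accuracy."),
    ("Expert", "Top-notch grammar skills! You communicate with great clarity and minimal errors. Keep up the excellent work.") ]

def generate_grammar_summary_alt (grammar_score : Int) : String × String :=
  if ¬ (0 ≤ grammar_score ∧ grammar_score < 10) then
    ("Unknown", "Grammar score outside the specified range.")
  else
    -- _PAIRS[bisect.bisect_right(_BOUNDS, grammar_score) - 1]; the index is in [0,3] here
    PySem.List.pyGetD pvPairs_B ((PySem.List.bisectRight pvBounds_B grammar_score : Int) - 1)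
      ("Unknown", "Grammar score outside the specified range.")

-- ===== PRECONDITION & SPEC =====
def Spec_generate_grammar_summary (grammar_score : Int) (out : String × String) : Prop := out = generate_grammar_summary_alt grammar_score
instance (grammar_score : Int) (out : String × String) : Decidable (Spec_generate_grammar_summary grammar_score out) := by unfold Spec_generate_grammar_summary; infer_instance

-- ===== CLAIM (what is proved, stated in full; the proofs are below) =====
def Claim_equal_generate_grammar_summary : Prop := ∀ (grammar_score : Int), Dom_generate_grammar_summary grammar_score → Spec_generate_grammar_summary grammar_score (generate_grammar_summary grammar_score)

-- ===== LEMMAS AND PROOFS =====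

-- pin bisect_right's index on each score interval, via the library spec lemma
theorem pvB1 (s : Int) (h0 : 0 ≤ s) (h4 : s < 4) :
    PySem.List.bisectRight pvBounds_B s = 1 := by
  obtain ⟨hA, hB, hC⟩ := PySem.List.bisectRight_spec pvBounds_B s (by decide)
  have e1 := hC 0 (by simp [pvBounds_B])
  have e2 := hB 1 (by simp [pvBounds_B])
  simp [pvBounds_B] at e1 e2 ⊢
  omega

theorem pvB2 (s : Int) (h4 : 4 ≤ s) (h6 : s < 6) :
    PySem.List.bisectRight pvBounds_B s = 2 := by
  obtain ⟨hA, hB, hC⟩ := PySem.List.bisectRight_spec pvBounds_B s (by decide)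
  have e1 := hC 1 (by simp [pvBounds_B])
  have e2 := hB 2 (by simp [pvBounds_B])
  simp [pvBounds_B] at e1 e2 ⊢
  omega

theorem pvB3 (s : Int) (h6 : 6 ≤ s) (h8 : s < 8) :
    PySem.List.bisectRight pvBounds_B s = 3 := by
  obtain ⟨hA, hB, hC⟩ := PySem.List.bisectRight_spec pvBounds_B s (by decide)
  have e1 := hC 2 (by simp [pvBounds_B])
  have e2 := hB 3 (by simp [pvBounds_B])
  simp [pvBounds_B] at e1 e2 ⊢
  omega

theorem pvB4 (s : Int) (h8 : 8 ≤ s) (h10 : s < 10) :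
    PySem.List.bisectRight pvBounds_B s = 4 := by
  obtain ⟨hA, hB, hC⟩ := PySem.List.bisectRight_spec pvBounds_B s (by decide)
  have e1 := hC 3 (by simp [pvBounds_B])
  have e2 := hB 4 (by simp [pvBounds_B])
  simp [pvBounds_B] at e1 e2 ⊢
  omega

-- ===== VERDICT (by name: the statement is the Claim_ definition above) =====
theorem generate_grammar_summary_spec : Claim_equal_generate_grammar_summary := by
  intro s _
  unfold Spec_generate_grammar_summary generate_grammar_summary generate_grammar_summary_alt
  rcases lt_or_ge s 0 with h | h
  · simp [pvScanSegments, pvSegments_A,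
      show ¬ ((0:Int) ≤ s) by omega, show ¬ ((4:Int) ≤ s) by omega,
      show ¬ ((6:Int) ≤ s) by omega, show ¬ ((8:Int) ≤ s) by omega]
  · rcases lt_or_ge s 4 with h4 | h4
    · rw [pvB1 s h h4]
      simp [pvScanSegments, pvSegments_A, pvPairs_B, PySem.List.pyGetD,
        PySem.List.pyGet?, PySem.List.pyIdx?,
        show (0:Int) ≤ s by omega, show s < 4 by omega, show s < 10 by omega]
    · rcases lt_or_ge s 6 with h6 | h6
      · rw [pvB2 s h4 h6]
        simp [pvScanSegments, pvSegments_A, pvPairs_B, PySem.List.pyGetD,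
          PySem.List.pyGet?, PySem.List.pyIdx?,
          show (0:Int) ≤ s by omega, show (4:Int) ≤ s by omega, show ¬ (s < 4) by omega,
          show s < 6 by omega, show s < 10 by omega]
      · rcases lt_or_ge s 8 with h8 | h8
        · rw [pvB3 s h6 h8]
          simp [pvScanSegments, pvSegments_A, pvPairs_B, PySem.List.pyGetD,
            PySem.List.pyGet?, PySem.List.pyIdx?,
            show (0:Int) ≤ s by omega, show (4:Int) ≤ s by omega, show (6:Int) ≤ s by omega,
            show ¬ (s < 4) by omega, show ¬ (s < 6) by omega, show s < 8 by omega,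
            show s < 10 by omega]
        · rcases lt_or_ge s 10 with h10 | h10
          · rw [pvB4 s h8 h10]
            simp [pvScanSegments, pvSegments_A, pvPairs_B, PySem.List.pyGetD,
              PySem.List.pyGet?, PySem.List.pyIdx?,
              show (0:Int) ≤ s by omega, show (4:Int) ≤ s by omega, show (6:Int) ≤ s by omega,
              show (8:Int) ≤ s by omega, show ¬ (s < 4) by omega, show ¬ (s < 6) by omega,
              show ¬ (s < 8) by omega, show s < 10 by omega]
          · simp [pvScanSegments, pvSegments_A,
              show ¬ (s < 4) by omega, show ¬ (s < 6) by omega, show ¬ (s < 8) by omega,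
              show ¬ (s < 10) by omega]
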